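-- pv_equiv track=rewrite | github.com/Hayato-Kossy/Recursion | ハッシュマップ/アラブ人による頻度分析.py | get_hashmap
-- ===== SOURCE A (Python) =====
-- def get_hashmap(message):
--     message = sorted(message.replace(" ", ""))
--     hashmap = {}
--     ans = []
--
--     for word in message:
--         if word not in hashmap: hashmap[word] = 1
--         else: hashmap[word] += 1
--
--     for key in hashmap:
--         ans.append(str(key) + " : " + str(hashmap[key]))
--
--     return ans
-- ===== SOURCE B (Python) =====
-- def get_hashmap(message):
--     chars = sorted(message.replace(" ", ""))
--     ans = []
--     while chars:
--         c = chars[0]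
--         k = 1
--         while k < len(chars) and chars[k] == c:
--             k += 1
--         ans.append(c + " : " + str(k))
--         chars = chars[k:]
--     return ans
-- ===== Notes on version B (the rewrite author's own statement) =====
-- stated objective: alternative
-- what changed: Replaces the hashmap build (membership-test loop) plus dict-iteration pass with a single run-length scan over the sorted character list: equal characters are adjacent after sorting, so each contiguous run is counted and emitted directly.
import Mathlib
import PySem

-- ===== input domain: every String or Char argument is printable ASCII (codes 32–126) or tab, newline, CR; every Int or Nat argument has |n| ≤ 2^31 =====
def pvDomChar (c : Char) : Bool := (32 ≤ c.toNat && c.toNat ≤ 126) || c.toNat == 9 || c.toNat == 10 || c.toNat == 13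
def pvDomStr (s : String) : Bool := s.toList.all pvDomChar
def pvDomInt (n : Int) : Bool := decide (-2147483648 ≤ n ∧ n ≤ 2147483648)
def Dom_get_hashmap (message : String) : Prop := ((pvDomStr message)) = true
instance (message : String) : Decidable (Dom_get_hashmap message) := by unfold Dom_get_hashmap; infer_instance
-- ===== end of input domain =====

-- B replaces A's hashmap build and dict-iteration pass with one run-length scan
-- over the sorted character list (equal characters are adjacent after sorting).

-- "c : n" entry, shared formatting of both Pythons (str(key) + " : " + str(count))
def pvEntry (c : Char) (n : Int) : String :=
  String.ofList ([c] ++ (' ' :: ':' :: ' ' :: []) ++ PySem.Int.toChars n)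

-- ===== PORT A =====
-- sorted(message.replace(" ", "")) : a sorted list of the characters.
-- hashmap[key] on 'key in hashmap' is exact as getD _ 0 (the key is present).
def get_hashmap (message : String) : List String :=
  let msg : List Char :=
    PySem.List.sorted (PySem.Str.replace message " " "").toList (fun c => c) false
  let hashmap : PySem.Dict Char Int :=
    msg.foldl
      (fun h w =>
        if h.contains w = false then h.insert w 1
        else h.insert w (h.getD w 0 + 1))
      PySem.Dict.empty
  hashmap.keys.foldl (fun ans k => ans ++ [pvEntry k (hashmap.getD k 0)]) []

-- ===== PORT B =====
-- the outer while loop of Source B: take the run of the leading character (the inner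
-- while counting k is the takeWhile length + 1), emit it, continue on chars[k:]
def pvRuns : List Char → List String
  | [] => []
  | c :: rest =>
      pvEntry c ((rest.takeWhile (fun x => x == c)).length + 1)
        :: pvRuns (rest.dropWhile (fun x => x == c))
termination_by l => l.length
decreasing_by
  simpa using Nat.lt_succ_of_le (List.length_dropWhile_le _ _)

def get_hashmap_alt (message : String) : List String :=
  pvRuns (PySem.List.sorted (PySem.Str.replace message " " "").toList (fun c => c) false)

-- ===== PRECONDITION & SPEC =====
def Spec_get_hashmap (message : String) (out : List String) : Prop := out = get_hashmap_alt message
instance (message : String) (out : List String) : Decidable (Spec_get_hashmap message out) := by unfold Spec_get_hashmap; infer_instance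

-- ===== CLAIM (what is proved, stated in full; the proofs are below) =====
def Claim_equal_get_hashmap : Prop := ∀ (message : String), Dom_get_hashmap message → Spec_get_hashmap message (get_hashmap message)

-- ===== LEMMAS AND PROOFS =====

-- folding Set.add over elements already present leaves the set unchanged
lemma pv_foldl_add_mem (t : List Char) (s : PySem.Set Char) (ht : ∀ x ∈ t, x ∈ s) :
    t.foldl PySem.Set.add s = s := by
  induction t with
  | nil => rfl
  | cons a t ih =>
      have ha : a ∈ s := ht a (by simp)
      have : PySem.Set.add s a = s := by
        simp [PySem.Set.add, PySem.Set.contains, ha]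
      rw [List.foldl_cons, this]
      exact ih (fun x hx => ht x (by simp [hx]))

-- a head not occurring in the rest of the fold stays in front
lemma pv_foldl_add_cons (r : List Char) (c : Char) (s : PySem.Set Char)
    (hr : ∀ x ∈ r, x ≠ c) :
    r.foldl PySem.Set.add (c :: s) = c :: r.foldl PySem.Set.add s := by
  induction r generalizing s with
  | nil => rfl
  | cons a r ih =>
      have hac : a ≠ c := hr a (by simp)
      have : PySem.Set.add (c :: s) a = c :: PySem.Set.add s a := by
        simp [PySem.Set.add, PySem.Set.contains, hac]
        split_ifs <;> rfl
      rw [List.foldl_cons, this, List.foldl_cons]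
      exact ih (PySem.Set.add s a) (fun x hx => hr x (List.mem_cons_of_mem _ hx))

-- A's counting loop is Counter(msg)
lemma pv_build_eq_counter (l : List Char) :
    l.foldl
      (fun h w =>
        if h.contains w = false then h.insert w 1
        else h.insert w (h.getD w 0 + 1))
      PySem.Dict.empty = PySem.Dict.counter l := by
  rw [← PySem.Dict.foldl_insert_getD_add_one_eq_counter]
  apply PySem.List.foldl_congr_mem
  intro acc x _
  by_cases hc : acc.contains x = false
  · simp [hc, PySem.Dict.getD_of_not_contains acc 0 hc]
  · simp [hc]

-- the heart: on a sorted list, first-occurrence order + total counts = run-length runs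
lemma pv_map_eq_runs (l : List Char) (h : l.Pairwise (· ≤ ·)) :
    (PySem.Set.ofList l).map (fun k => pvEntry k (l.count k)) = pvRuns l := by
  induction l using pvRuns.induct with
  | case1 => simp [pvRuns]
  | case2 c rest ih =>
      have hrest : ∀ x ∈ rest, c ≤ x := (List.pairwise_cons.mp h).1
      have hrp : rest.Pairwise (· ≤ ·) := (List.pairwise_cons.mp h).2
      set t := rest.takeWhile (fun x => x == c) with htdef
      set r := rest.dropWhile (fun x => x == c) with hrdef
      have hsplit : rest = t ++ r := (List.takeWhile_append_dropWhile).symm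
      have ht : ∀ x ∈ t, x = c := by
        intro x hx
        have := List.mem_takeWhile_imp hx
        simpa using this
      -- every element of r is strictly greater than c
      have hrgt : ∀ x ∈ r, c < x := by
        intro x hx
        have hsub : r.Sublist rest := List.dropWhile_sublist _
        have hle : c ≤ x := hrest x (hsub.subset hx)
        rcases eq_or_lt_of_le hle with heq | hlt
        · exfalso
          cases hr0 : r with
          | nil => rw [hr0] at hx; simp at hx
          | cons a r' =>
              have hane : ¬ ((fun x => x == c) a = true) := by
                have := List.head?_dropWhile_not (fun x => x == c) rest
                rw [← hrdef, hr0] at this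
                simpa using this
              have hane' : a ≠ c := by simpa using hane
              have hrpair : r.Pairwise (· ≤ ·) := hrp.sublist hsub
              rw [hr0] at hx
              rcases List.mem_cons.mp hx with hxa | hxr'
              · exact hane' (hxa ▸ heq.symm)
              · have hale : a ≤ x := by
                  rw [hr0] at hrpair
                  exact (List.pairwise_cons.mp hrpair).1 x hxr'
                have hca : c ≤ a := hrest a (hsub.subset (by rw [hr0]; simp))
                have : a = c := le_antisymm (hale.trans heq.ge) hca
                exact hane' this
        · exact hlt
      have hcnr : ∀ x ∈ r, x ≠ c := fun x hx => (hrgt x hx).ne'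
      have hcnotr : c ∉ r := fun hc => (hrgt c hc).false
      -- the set decomposes
      have hset : PySem.Set.ofList (c :: rest) = c :: PySem.Set.ofList r := by
        rw [PySem.Set.ofList_eq_foldl, PySem.Set.ofList_eq_foldl, hsplit]
        have h0 : PySem.Set.add ([] : PySem.Set Char) c = [c] := by
          simp [PySem.Set.add, PySem.Set.contains]
        rw [List.foldl_cons, h0, List.foldl_append]
        rw [pv_foldl_add_mem t [c] (fun x hx => by simp [ht x hx])]
        exact pv_foldl_add_cons r c [] hcnr
      -- counts
      have htc : t.count c = t.length := List.count_eq_length.mpr (fun b hb => (ht b hb).symm)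
      have hrc : r.count c = 0 := List.count_eq_zero.mpr hcnotr
      have hcount_c : (c :: rest).count c = t.length + 1 := by
        rw [List.count_cons_self, hsplit, List.count_append, htc, hrc]
      have hcount_k : ∀ k ∈ r, (c :: rest).count k = r.count k := by
        intro k hk
        have hkc : k ≠ c := hcnr k hk
        have htk : t.count k = 0 := List.count_eq_zero.mpr (fun hkt => hkc (ht k hkt))
        rw [List.count_cons_of_ne (Ne.symm hkc), hsplit, List.count_append, htk, Nat.zero_add]
      rw [hset, List.map_cons]
      rw [pvRuns]
      congr 1
      · rw [hcount_c, ← htdef]; push_cast; ring_nf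
      · rw [← hrdef, ← ih (hrp.sublist (List.dropWhile_sublist _))]
        apply List.map_congr_left
        intro k hk
        have hkr : k ∈ r := by
          exact (PySem.Set.mem_ofList r k).mp hk
        rw [hcount_k k hkr]

-- ===== VERDICT (by name: the statement is the Claim_ definition above) =====
theorem get_hashmap_spec : Claim_equal_get_hashmap := by
  intro message _
  unfold Spec_get_hashmap get_hashmap get_hashmap_alt
  dsimp only
  set l : List Char :=
    PySem.List.sorted (PySem.Str.replace message " " "").toList (fun c => c) false with hl
  have hsorted : l.Pairwise (· ≤ ·) := PySem.List.sorted_pairwise _ _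
  rw [pv_build_eq_counter]
  rw [PySem.List.foldl_append_singleton_eq_map]
  rw [PySem.Dict.keys_counter]
  have : ∀ k, (PySem.Dict.counter l).getD k 0 = (l.count k : Int) := fun k =>
    PySem.Dict.getD_counter l k
  simp only [this, List.nil_append]
  exact pv_map_eq_runs l hsorted
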